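-- pv_equiv track=rewrite | github.com/jmishra01/Google_foobar_Challenge | 4/4_1 Distract the Guards.py | check
-- ===== SOURCE A (Python) =====
-- def check(x, y):
--     if (x+y)%2 == 1:
--         return 1
--     if x == y:
--         return 0
--     if (x+y)%4 != 0:
--         return 1
--     mem = [x]
--     append = mem.append
--     while True:
--         if x < y:
--             x, y = 2*x, y - x
--         elif y < x:
--             x, y = 2*y, x - y
--         else:
--             del mem
--             return 0
--         if x in mem:
--             del mem
--             return 1
--         append(x)
-- ===== SOURCE B (Python) =====
-- def check(x, y):
--     if x == y:
--         return 0
--     if x <= 0 or y <= 0: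
--         return 1
--     a, b = x, y
--     while b:
--         a, b = b, a % b
--     m = (x + y) // a
--     while m % 2 == 0:
--         m //= 2
--     return 0 if m == 1 else 1
-- ===== Notes on version B (the rewrite author's own statement) =====
-- stated objective: alternative
-- what changed: A simulates the doubling game step by step while scanning a growing history list for a repeated state; B replaces the whole simulation by number theory: the game terminates iff (x+y)/gcd(x,y) is a power of two, computed with one Euclid loop and one halving loop.
import Mathlib
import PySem

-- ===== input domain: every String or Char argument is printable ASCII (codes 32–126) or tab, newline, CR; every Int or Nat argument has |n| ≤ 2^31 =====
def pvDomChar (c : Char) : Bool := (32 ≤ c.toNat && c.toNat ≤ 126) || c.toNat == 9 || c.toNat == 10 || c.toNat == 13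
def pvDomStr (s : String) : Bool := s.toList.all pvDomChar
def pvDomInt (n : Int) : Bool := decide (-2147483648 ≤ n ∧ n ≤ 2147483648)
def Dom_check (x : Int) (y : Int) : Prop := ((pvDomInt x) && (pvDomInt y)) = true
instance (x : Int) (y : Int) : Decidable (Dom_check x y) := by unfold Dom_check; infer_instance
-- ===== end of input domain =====

-- B replaces A's step-by-step game simulation (which scans a growing history list each step)
-- by the gcd/power-of-two characterisation of the game (a different algorithm of similar
-- measured cost on typical inputs).

-- ===== PORT A =====
-- A's 'while True' loop, fueled; 'none' = fuel exhausted (proved unreachable under Pre_).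
def checkLoop : Nat → Int → Int → List Int → Option Int
  | 0, _, _, _ => none
  | fuel + 1, x, y, mem =>
    if x < y then
      if 2 * x ∈ mem then some 1 else checkLoop fuel (2 * x) (y - x) (mem ++ [2 * x])
    else if y < x then
      if 2 * y ∈ mem then some 1 else checkLoop fuel (2 * y) (x - y) (mem ++ [2 * y])
    else some 0

def check (x : Int) (y : Int) : Int :=
  if (x + y) % 2 = 1 then 1
  else if x = y then 0
  else if (x + y) % 4 ≠ 0 then 1
  else (checkLoop (x + y).natAbs x y [x]).getD 0

-- ===== PORT B =====
-- Source B's Euclid loop 'while b: a, b = b, a % b'.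
def gcdLoop (a : Int) (b : Int) : Int :=
  if h : b = 0 then a else gcdLoop b (PySem.Int.mod a b)
termination_by b.natAbs
decreasing_by
  rcases lt_trichotomy b 0 with hb | hb | hb
  · have h1 := (PySem.Int.mod_neg_bounds a hb).1
    have h2 := (PySem.Int.mod_neg_bounds a hb).2
    omega
  · exact absurd hb h
  · have h1 := PySem.Int.mod_nonneg a hb
    have h2 := PySem.Int.mod_lt a hb
    omega

def oddLoop (m : Int) : Int :=
  if h : PySem.Int.mod m 2 = 0 ∧ m ≠ 0 then oddLoop (PySem.Int.floordiv m 2) else m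
termination_by m.natAbs
decreasing_by
  rw [PySem.Int.floordiv_eq_ediv_of_pos (by norm_num)]
  obtain ⟨k, rfl⟩ : (2:ℤ) ∣ m := (PySem.Int.mod_eq_zero_iff_dvd m 2).1 h.1
  rw [Int.mul_ediv_cancel_left _ (by norm_num)]
  have hk : k ≠ 0 := by rintro rfl; simp at h
  omega

def check_alt (x : Int) (y : Int) : Int :=
  if x = y then 0
  else if x ≤ 0 ∨ y ≤ 0 then 1
  else
    let g := gcdLoop x y
    let m := PySem.Int.floordiv (x + y) g
    if oddLoop m = 1 then 0 else 1

-- ===== PRECONDITION & SPEC =====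
-- Pre_ excludes exactly the inputs on which A's while-loop never terminates (A returns no
-- value there): a negative argument together with x ≠ y and x + y ≡ 0 (mod 4).
def Pre_check (x : Int) (y : Int) : Prop :=
  (x + y) % 2 = 1 ∨ x = y ∨ (x + y) % 4 ≠ 0 ∨ (0 ≤ x ∧ 0 ≤ y)
instance (x : Int) (y : Int) : Decidable (Pre_check x y) := by unfold Pre_check; infer_instance

def pvWitness_check : Int × Int := (6, 2)

def Spec_check (x : Int) (y : Int) (out : Int) : Prop := out = check_alt x y
instance (x : Int) (y : Int) (out : Int) : Decidable (Spec_check x y out) := by unfold Spec_check; infer_instance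

-- ===== CLAIM (what is proved, stated in full; the proofs are below) =====
def Claim_equal_check : Prop := ∀ (x : Int) (y : Int), Dom_check x y → Pre_check x y → Spec_check x y (check x y)

-- ===== LEMMAS AND PROOFS =====

lemma odd_of_mod_ne (m : Int) (h : ¬ (PySem.Int.mod m 2 = 0 ∧ m ≠ 0)) (hm : m ≠ 0) : Odd m := by
  rw [PySem.Int.mod_eq_emod_of_pos (by norm_num : (0:ℤ) < 2)] at h
  rw [Int.odd_iff]
  omega

lemma pow2_mul_odd_inj : ∀ (i j : Nat) (d e : Int), Odd d → Odd e →
    (2:ℤ)^i * d = 2^j * e → i = j ∧ d = e := by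
  intro i
  induction i with
  | zero =>
    intro j d e hd he h
    cases j with
    | zero => simpa using h
    | succ j' =>
      exfalso
      simp only [pow_zero, one_mul, pow_succ] at h
      have hev : Even d := ⟨2^j' * e, by linarith⟩
      exact (Int.not_even_iff_odd.mpr hd) hev
  | succ i' ih =>
    intro j d e hd he h
    cases j with
    | zero =>
      exfalso
      simp only [pow_zero, one_mul, pow_succ] at h
      have hev : Even e := ⟨2^i' * d, by linarith⟩
      exact (Int.not_even_iff_odd.mpr he) hev
    | succ j' =>
      have h2 : (2:ℤ)^i' * d = 2^j' * e := by
        have h2 : (2:ℤ) * (2^i' * d) = 2 * (2^j' * e) := by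
          rw [pow_succ, pow_succ] at h; linarith
        exact mul_left_cancel₀ (by norm_num) h2
      obtain ⟨h3, h4⟩ := ih j' d e hd he h2
      exact ⟨by omega, h4⟩

lemma odd_dvd_of_dvd_two_mul (w x : Int) (hw : Odd w) (h : w ∣ 2 * x) : w ∣ x := by
  have hc : IsCoprime w 2 := by
    rw [Int.isCoprime_iff_gcd_eq_one]
    have h1 : Int.gcd w 2 ∣ (2:Int).natAbs := Int.gcd_dvd_natAbs_right w 2
    have h2 : Int.gcd w 2 ∣ w.natAbs := Int.gcd_dvd_natAbs_left w 2
    have h3 : ¬ (2 ∣ w.natAbs) := by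
      intro hd
      have h5 : (2:ℤ) ∣ w := Int.natAbs_dvd_natAbs.mp (by simpa using hd)
      exact (Int.not_even_iff_odd.mpr hw) (even_iff_two_dvd.mpr h5)
    have h4 := (Nat.dvd_prime Nat.prime_two).mp h1
    rcases h4 with h4 | h4
    · exact h4
    · exact absurd (h4 ▸ h2) h3
  exact hc.dvd_of_dvd_mul_left h

lemma odd_dvd_of_dvd_mul_two_pow (w a : Int) (k : Nat) (hw : Odd w) (h : w ∣ a * 2^k) : w ∣ a := by
  induction k with
  | zero => simpa using h
  | succ k ih =>
    apply ih
    apply odd_dvd_of_dvd_two_mul w _ hw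
    have : a * 2^(k+1) = 2 * (a * 2^k) := by ring
    rwa [this] at h

lemma oddLoop_spec (m : Int) (hm : 0 < m) :
    Odd (oddLoop m) ∧ 0 < oddLoop m ∧ ∃ k : Nat, m = 2^k * oddLoop m := by
  have H : ∀ (n : Nat) (m : Int), m.natAbs ≤ n → 0 < m →
      Odd (oddLoop m) ∧ 0 < oddLoop m ∧ ∃ k : Nat, m = 2^k * oddLoop m := by
    intro n
    induction n with
    | zero => intro m hle hm; omega
    | succ n ih =>
      intro m hle hm
      rw [oddLoop]
      split
      · rename_i h
        obtain ⟨k, rfl⟩ : (2:ℤ) ∣ m := (PySem.Int.mod_eq_zero_iff_dvd m 2).1 h.1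
        rw [PySem.Int.floordiv_eq_ediv_of_pos (by norm_num), Int.mul_ediv_cancel_left _ (by norm_num)]
        obtain ⟨h1, h2, j, h3⟩ := ih k (by omega) (by omega)
        exact ⟨h1, h2, j + 1, by rw [pow_succ]; linear_combination 2 * h3⟩
      · rename_i h
        exact ⟨odd_of_mod_ne m h (by omega), hm, 0, by ring⟩
  exact H m.natAbs m le_rfl hm

lemma exists_two_pow_mul_odd (m : Int) (hm : 0 < m) :
    ∃ (k : Nat) (d : Int), Odd d ∧ 0 < d ∧ m = 2^k * d := by
  obtain ⟨h1, h2, k, h3⟩ := oddLoop_spec m hm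
  exact ⟨k, oddLoop m, h1, h2, h3⟩

-- no power-of-two form exists when the sum is not divisible by 4

lemma oddLoop_eq_one_iff (m : Int) (hm : 0 < m) : oddLoop m = 1 ↔ ∃ k : Nat, m = 2^k := by
  obtain ⟨h1, h2, j, h3⟩ := oddLoop_spec m hm
  constructor
  · intro h; exact ⟨j, by rw [h3, h, mul_one]⟩
  · rintro ⟨k, hk⟩
    have h4 : (2:ℤ)^k * 1 = 2^j * oddLoop m := by rw [mul_one, ← hk]; exact h3
    exact (pow2_mul_odd_inj k j 1 (oddLoop m) (by norm_num) h1 h4).2.symm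

lemma gcd_emod_step (a b : Int) : Int.gcd b (a % b) = Int.gcd a b := by
  conv_lhs => rw [Int.emod_def]
  rw [mul_comm b (a/b), Int.gcd_sub_mul_right_right b a (a / b)]
  exact Int.gcd_comm b a

lemma gcdLoop_eq_gcd (a b : Int) (ha : 0 < a) (hb : 0 ≤ b) : gcdLoop a b = Int.gcd a b := by
  have H : ∀ (n : Nat) (a b : Int), b.natAbs ≤ n → 0 < a → 0 ≤ b → gcdLoop a b = Int.gcd a b := by
    intro n
    induction n with
    | zero =>
      intro a b hle ha hb
      have hb0 : b = 0 := by omega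
      rw [gcdLoop, dif_pos hb0, hb0]
      simp [Int.gcd, Int.natAbs_of_nonneg ha.le]
    | succ n ih =>
      intro a b hle ha hb
      rcases eq_or_lt_of_le hb with hb0 | hb0
      · rw [gcdLoop, dif_pos hb0.symm, ← hb0]
        simp [Int.gcd, Int.natAbs_of_nonneg ha.le]
      · rw [gcdLoop, dif_neg (by omega)]
        rw [PySem.Int.mod_eq_emod_of_pos hb0]
        have h1 : 0 ≤ a % b := Int.emod_nonneg a (by omega)
        have h2 : a % b < b := Int.emod_lt_of_pos a hb0
        rw [ih b (a % b) (by omega) hb0 h1]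
        exact_mod_cast congrArg (fun n : Nat => (n:ℤ)) (gcd_emod_step a b)
  exact H b.natAbs a b le_rfl ha hb

lemma nodup_length_le (mem : List Int) (s : Int) (_hs : 1 ≤ s) (hn : mem.Nodup)
    (hb : ∀ z ∈ mem, 0 < z ∧ z < s) : (mem.length : ℤ) ≤ s - 1 := by
  have h1 : mem.toFinset ⊆ Finset.Ioo (0:ℤ) s := by
    intro z hz
    rw [List.mem_toFinset] at hz
    rcases hb z hz with ⟨h2, h3⟩
    rw [Finset.mem_Ioo]; exact ⟨h2, h3⟩
  have h2 := Finset.card_le_card h1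
  rw [List.toFinset_card_of_nodup hn, Int.card_Ioo] at h2
  omega

lemma checkLoop_pow (u : Nat) (w : Int) (_hw : Odd w) (hw0 : 0 < w) :
    ∀ (fuel a : Nat) (x y : Int) (mem : List Int),
      x + y = 2^u * w → 0 < x → 0 < y →
      (∃ d : Int, Odd d ∧ 0 < d ∧ x = 2^a * d * w) →
      a < u →
      (∀ z ∈ mem, ∃ a' ≤ a, ∃ d' : Int, Odd d' ∧ z = 2^a' * d' * w) →
      u - 1 - a < fuel →
      checkLoop fuel x y mem = some 0 := by
  intro fuel
  induction fuel with
  | zero => intro a x y mem _ _ _ _ ha _ hfuel; omega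
  | succ fuel ih =>
    rintro a x y mem hsum hx hy ⟨d, hd, hd0, hxd⟩ ha hmem hfuel
    have hpa : (0:ℤ) < 2^a := by positivity
    by_cases hcase : a + 1 = u
    · -- top of the run: x = y, the loop returns 0
      have hxs : x < 2^u * w := by linarith
      have hd1 : d = 1 := by
        rw [hxd, ← hcase, pow_succ] at hxs
        have h2 : d < 2 := by nlinarith
        rcases hd with ⟨t, ht⟩
        omega
      have hxy : x = y := by
        have h2 : 2 * x = 2^u * w := by
          rw [hxd, hd1, ← hcase, pow_succ]; ring
        linarith
      simp only [checkLoop]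
      rw [if_neg (by omega), if_neg (by omega)]
    · -- a + 1 < u : one more doubling step
      have hau : a + 1 < u := by omega
      have hxy : x ≠ y := by
        intro hxy
        have h0 : 2 * x = 2^u * w := by linarith
        rw [hxd] at h0
        have h1 : (2:ℤ)^(a+1) * d * w = 2^u * 1 * w := by
          rw [pow_succ]; linear_combination h0
        have h2 := mul_right_cancel₀ (ne_of_gt hw0) h1
        have := (pow2_mul_odd_inj (a+1) u d 1 hd (by norm_num) h2).1
        omega
      have step : ∀ (d' : Int), Odd d' → 0 < d' → ∀ x' y', x' = 2^(a+1) * d' * w →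
          x' + y' = 2^u * w → 0 < y' →
          (if x' ∈ mem then some 1 else checkLoop fuel x' y' (mem ++ [x'])) = some 0 := by
        intro d' hd' hd0' x' y' hx' hsum' hy'
        rw [if_neg ?notmem]
        case notmem =>
          intro hin
          obtain ⟨a', ha', d'', hd'', hz⟩ := hmem x' hin
          rw [hx'] at hz
          have hzc : (2:ℤ)^a' * d'' = 2^(a+1) * d' :=
            mul_right_cancel₀ (ne_of_gt hw0) hz.symm
          have := (pow2_mul_odd_inj a' (a+1) d'' d' hd'' hd' hzc).1
          omega
        apply ih (a+1) x' y' (mem ++ [x']) hsum' (by rw [hx']; positivity) hy'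
          ⟨d', hd', hd0', hx'⟩ hau ?minv (by omega)
        case minv =>
          intro z hz
          rcases List.mem_append.mp hz with hz | hz
          · obtain ⟨a', ha', rest⟩ := hmem z hz
            exact ⟨a', by omega, rest⟩
          · rw [List.mem_singleton.mp hz, hx']
            exact ⟨a+1, le_rfl, d', hd', rfl⟩
      simp only [checkLoop]
      rcases lt_trichotomy x y with hlt | heq | hgt
      · rw [if_pos hlt]
        exact step d hd hd0 (2*x) (y-x) (by rw [hxd, pow_succ]; ring)
          (by linarith) (by omega)
      · exact absurd heq hxy
      · rw [if_neg (by omega), if_pos hgt]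
        have hpow : (2:ℤ)^a * 2^(u-a) = 2^u := by rw [← pow_add]; congr 1; omega
        have hy2 : y = 2^a * (2^(u-a) - d) * w := by
          have h3 : y = 2^u * w - x := by linarith
          rw [h3, hxd, ← hpow]; ring
        have hevn : Even ((2:ℤ)^(u-a)) := by
          obtain ⟨t, ht⟩ : ∃ t, u - a = t + 1 := ⟨u - a - 1, by omega⟩
          rw [ht, pow_succ]
          exact ⟨2^t, by ring⟩
        have hdodd' : Odd ((2:ℤ)^(u-a) - d) := hevn.sub_odd hd
        have hdpos' : 0 < (2:ℤ)^(u-a) - d := by nlinarith [hy2, hy]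
        exact step ((2:ℤ)^(u-a) - d) hdodd' hdpos' (2*y) (x-y)
          (by rw [hy2, pow_succ]; ring) (by linarith) (by omega)

lemma checkLoop_npow (u : Nat) (w : Int) (hw : Odd w) (hw0 : 0 < w) :
    ∀ (fuel : Nat) (x y : Int) (mem : List Int),
      x + y = 2^u * w → 0 < x → 0 < y →
      ¬ w ∣ x →
      mem.Nodup → (∀ z ∈ mem, 0 < z ∧ z < 2^u * w) →
      (2:ℤ)^u * w ≤ (fuel : ℤ) + mem.length →
      checkLoop fuel x y mem = some 1 := by
  intro fuel
  induction fuel with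
  | zero =>
    intro x y mem hsum hx hy hdvd hnd hbd hfuel
    exfalso
    have h1 : (1:ℤ) ≤ 2^u * w := by
      have h0 : (1:ℤ) ≤ 2^u := one_le_pow₀ (by norm_num)
      have h1 : (1:ℤ) ≤ w := by omega
      nlinarith
    have h2 := nodup_length_le mem (2^u * w) h1 hnd hbd
    simp at hfuel
    omega
  | succ fuel ih =>
    intro x y mem hsum hx hy hdvd hnd hbd hfuel
    have hwd : w ∣ 2^u * w := Dvd.intro_left _ rfl
    have hxy : x ≠ y := by
      intro hxy
      apply hdvd
      have h0 : 2 * x = 2^u * w := by linarith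
      have h1 : w ∣ 2 * x := h0 ▸ hwd
      exact odd_dvd_of_dvd_two_mul w x hw h1
    have step : ∀ x' y', x' = 2 * x ∨ x' = 2 * y → ¬ w ∣ x' → 0 < x' → x' < 2^u * w →
        x' + y' = 2^u * w → 0 < y' →
        (if x' ∈ mem then some 1 else checkLoop fuel x' y' (mem ++ [x'])) = some 1 := by
      intro x' y' _ hdvd' hx' hxs' hsum' hy'
      by_cases hin : x' ∈ mem
      · rw [if_pos hin]
      · rw [if_neg hin]
        apply ih x' y' (mem ++ [x']) hsum' hx' hy' hdvd'
          (by rw [List.nodup_append]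
              refine ⟨hnd, List.nodup_singleton _, ?_⟩
              intro a ha b hb
              rw [List.mem_singleton] at hb
              subst hb
              intro hab
              exact hin (hab ▸ ha))
          (by intro z hz
              rcases List.mem_append.mp hz with hz | hz
              · exact hbd z hz
              · rw [List.mem_singleton.mp hz]; exact ⟨hx', hxs'⟩)
          (by simp only [List.length_append, List.length_singleton]
              push_cast
              push_cast at hfuel
              linarith)
    simp only [checkLoop]
    rcases lt_trichotomy x y with hlt | heq | hgt
    · rw [if_pos hlt]
      refine step (2*x) (y-x) (Or.inl rfl) ?_ (by omega) (by linarith) (by linarith) (by omega)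
      intro h; exact hdvd (odd_dvd_of_dvd_two_mul w x hw h)
    · exact absurd heq hxy
    · rw [if_neg (by omega), if_pos hgt]
      refine step (2*y) (x-y) (Or.inr rfl) ?_ (by omega) (by linarith) (by linarith) (by omega)
      intro h
      have hy' : w ∣ y := odd_dvd_of_dvd_two_mul w y hw h
      apply hdvd
      have : x = 2^u * w - y := by linarith
      rw [this]
      exact dvd_sub hwd hy'

lemma gcd_pos (x y : Int) (hx : 0 < x) : (0:ℤ) < (Int.gcd x y : ℤ) := by
  have : Int.gcd x y ≠ 0 := by
    intro h
    rw [Int.gcd_eq_zero_iff] at h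
    omega
  omega

lemma gcd_dvd_sum (x y : Int) : (Int.gcd x y : ℤ) ∣ x + y :=
  dvd_add (Int.gcd_dvd_left x y) (Int.gcd_dvd_right x y)

lemma g_le_x (x y : Int) (hx : 0 < x) : (Int.gcd x y : ℤ) ≤ x :=
  Int.le_of_dvd hx (Int.gcd_dvd_left x y)

lemma check_alt_pos_eval (x y : Int) (hx : 0 < x) (hy : 0 < y) (hxy : x ≠ y) :
    check_alt x y = if oddLoop ((x + y) / (Int.gcd x y : ℤ)) = 1 then 0 else 1 := by
  unfold check_alt
  rw [if_neg hxy, if_neg (by push_neg; omega)]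
  show (if oddLoop (PySem.Int.floordiv (x + y) (gcdLoop x y)) = 1 then 0 else 1) = _
  rw [gcdLoop_eq_gcd x y hx hy.le,
    PySem.Int.floordiv_eq_ediv_of_pos (gcd_pos x y hx)]

lemma quot_pos (x y : Int) (hx : 0 < x) (_hy : 0 < y) :
    0 < (x + y) / (Int.gcd x y : ℤ) := by
  have hg := gcd_pos x y hx
  have hd := gcd_dvd_sum x y
  obtain ⟨m, hm⟩ := hd
  rw [hm, Int.mul_ediv_cancel_left _ (by omega)]
  nlinarith [hm]

lemma check_alt_pos_zero (x y : Int) (hx : 0 < x) (hy : 0 < y) (hxy : x ≠ y)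
    (h : ∃ k : Nat, x + y = (Int.gcd x y : ℤ) * 2^k) : check_alt x y = 0 := by
  rw [check_alt_pos_eval x y hx hy hxy]
  obtain ⟨k, hk⟩ := h
  rw [hk, Int.mul_ediv_cancel_left _ (by have := gcd_pos x y hx; omega)]
  rw [if_pos ((oddLoop_eq_one_iff _ (by positivity)).mpr ⟨k, rfl⟩)]

lemma check_alt_pos_one (x y : Int) (hx : 0 < x) (hy : 0 < y) (hxy : x ≠ y)
    (h : ¬ ∃ k : Nat, x + y = (Int.gcd x y : ℤ) * 2^k) : check_alt x y = 1 := by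
  rw [check_alt_pos_eval x y hx hy hxy]
  rw [if_neg]
  intro h1
  obtain ⟨k, hk⟩ := (oddLoop_eq_one_iff _ (quot_pos x y hx hy)).mp h1
  apply h
  refine ⟨k, ?_⟩
  obtain ⟨m, hm⟩ := gcd_dvd_sum x y
  rw [hm, Int.mul_ediv_cancel_left _ (by have := gcd_pos x y hx; omega)] at hk
  rw [hm, hk]

lemma bridge (x y : Int) (u : Nat) (w : Int) (hw : Odd w) (hw0 : 0 < w)
    (hx : 0 < x) (_hy : 0 < y) (hs : x + y = 2^u * w) :
    (∃ k : Nat, x + y = (Int.gcd x y : ℤ) * 2^k) ↔ w ∣ x := by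
  have hg := gcd_pos x y hx
  constructor
  · rintro ⟨k, hk⟩
    have hws : w ∣ x + y := Dvd.intro_left _ hs.symm
    rw [hk] at hws
    have hwg : w ∣ (Int.gcd x y : ℤ) := odd_dvd_of_dvd_mul_two_pow w _ k hw hws
    exact hwg.trans (Int.gcd_dvd_left x y)
  · intro hwx
    have hwy : w ∣ y := by
      have : y = x + y - x := by ring
      rw [this, hs]
      exact dvd_sub (Dvd.intro_left _ rfl) hwx
    have hwg : w ∣ (Int.gcd x y : ℤ) := by
      have h1 := dvd_gcd hwx hwy
      rwa [← Int.coe_gcd] at h1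
    obtain ⟨g', hg'⟩ := hwg
    have hg'pos : 0 < g' := by nlinarith [hg', hg]
    have hgs : (Int.gcd x y : ℤ) ∣ 2^u * w := hs ▸ gcd_dvd_sum x y
    rw [hg'] at hgs
    have hg'dvd : g' ∣ 2^u := by
      rcases hgs with ⟨t, ht⟩
      refine ⟨t, ?_⟩
      have hwne : w ≠ 0 := ne_of_gt hw0
      have : w * (g' * t) = w * 2^u := by ring_nf; ring_nf at ht; linarith
      have := mul_left_cancel₀ hwne this
      linarith
    have hg'nat : g'.natAbs ∣ 2^u := by
      have := Int.natAbs_dvd_natAbs.mpr hg'dvd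
      simpa using this
    obtain ⟨j, hj, hjeq⟩ := (Nat.dvd_prime_pow Nat.prime_two).mp hg'nat
    have hg'eq : g' = 2^j := by
      have : (g'.natAbs : ℤ) = g' := Int.natAbs_of_nonneg hg'pos.le
      rw [← this, hjeq]
      push_cast
      ring
    refine ⟨u - j, ?_⟩
    rw [hs, hg', hg'eq]
    have hju : j + (u - j) = u := by omega
    calc (2:ℤ)^u * w = 2^(j + (u - j)) * w := by rw [hju]
      _ = w * 2^j * 2^(u - j) := by rw [pow_add]; ring

lemma no_pow_of_not_four_dvd (x y : Int) (hx : 0 < x) (hy : 0 < y) (hxy : x ≠ y)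
    (h4 : ¬ (4:ℤ) ∣ x + y) : ¬ ∃ k : Nat, x + y = (Int.gcd x y : ℤ) * 2^k := by
  rintro ⟨k, hk⟩
  have hgx := g_le_x x y hx
  have hgy : (Int.gcd x y : ℤ) ≤ y := Int.le_of_dvd hy (Int.gcd_dvd_right x y)
  match k with
  | 0 => simp at hk; omega
  | 1 =>
    norm_num [pow_one] at hk
    obtain ⟨a, ha⟩ := Int.gcd_dvd_left x y
    obtain ⟨b, hb⟩ := Int.gcd_dvd_right x y
    have hg := gcd_pos x y hx
    have hab : a = 1 ∧ b = 1 := by constructor <;> nlinarith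
    rw [hab.1, mul_one] at ha
    rw [hab.2, mul_one] at hb
    exact hxy (ha.trans hb.symm)
  | (k+2) =>
    apply h4
    exact ⟨(Int.gcd x y : ℤ) * 2^k, by rw [hk, pow_succ, pow_succ]; ring⟩

lemma no_pow_of_odd (x y : Int) (hx : 0 < x) (hy : 0 < y)
    (h2 : ¬ (2:ℤ) ∣ x + y) : ¬ ∃ k : Nat, x + y = (Int.gcd x y : ℤ) * 2^k := by
  rintro ⟨k, hk⟩
  have hgx := g_le_x x y hx
  match k with
  | 0 => simp at hk; omega
  | (k+1) =>
    apply h2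
    exact ⟨(Int.gcd x y : ℤ) * 2^k, by rw [hk, pow_succ]; ring⟩

lemma check_eq_alt : ∀ (x y : Int), Pre_check x y → check x y = check_alt x y := by
  intro x y hpre
  unfold check
  by_cases h2 : (x + y) % 2 = 1
  · rw [if_pos h2]
    have hxy : x ≠ y := by intro h; omega
    by_cases hnp : x ≤ 0 ∨ y ≤ 0
    · unfold check_alt
      rw [if_neg hxy, if_pos hnp]
    · push_neg at hnp
      exact (check_alt_pos_one x y hnp.1 hnp.2 hxy
        (no_pow_of_odd x y hnp.1 hnp.2 (by omega))).symm
  · rw [if_neg h2]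
    by_cases hxy : x = y
    · rw [if_pos hxy]
      unfold check_alt
      rw [if_pos hxy]
    · rw [if_neg hxy]
      by_cases h4 : (x + y) % 4 ≠ 0
      · rw [if_pos h4]
        by_cases hnp : x ≤ 0 ∨ y ≤ 0
        · unfold check_alt
          rw [if_neg hxy, if_pos hnp]
        · push_neg at hnp
          exact (check_alt_pos_one x y hnp.1 hnp.2 hxy
            (no_pow_of_not_four_dvd x y hnp.1 hnp.2 hxy (by omega))).symm
      · rw [if_neg h4]
        push_neg at h4
        obtain ⟨hx0, hy0⟩ : 0 ≤ x ∧ 0 ≤ y := by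
          rcases hpre with h | h | h | h
          · exact absurd h h2
          · exact absurd h hxy
          · exact absurd h4 h
          · exact h
        by_cases hxz : x = 0
        · -- x = 0, y ≥ 4: the loop repeats x = 0 at once
          subst hxz
          have hy4 : 4 ≤ y := by omega
          obtain ⟨n, hn⟩ : ∃ n, (0 + y).natAbs = n + 1 := ⟨(0+y).natAbs - 1, by omega⟩
          rw [hn]
          simp only [checkLoop]
          rw [if_pos (by omega : (0:ℤ) < y)]
          norm_num
          unfold check_alt
          rw [if_neg hxy, if_pos (Or.inl le_rfl)]
        · by_cases hyz : y = 0
          · -- y = 0, x ≥ 4: two steps reach a repeated 0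
            subst hyz
            have hx4 : 4 ≤ x := by omega
            obtain ⟨n, hn⟩ : ∃ n, (x + 0).natAbs = n + 2 := ⟨(x+0).natAbs - 2, by omega⟩
            rw [hn]
            simp only [checkLoop]
            rw [if_neg (by omega : ¬ x < 0), if_pos (by omega : (0:ℤ) < x)]
            rw [if_neg (by simp; omega)]
            norm_num
            rw [if_pos (by omega : (0:ℤ) < x)]
            norm_num
            unfold check_alt
            rw [if_neg hxy, if_pos (Or.inr le_rfl)]
          · -- main case: 0 < x, 0 < y
            have hx : 0 < x := by omega
            have hy : 0 < y := by omega
            obtain ⟨u, m, hm2, hmeq⟩ :=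
              Nat.exists_eq_pow_mul_and_not_dvd (n := (x+y).toNat) (by omega) 2 (by norm_num)
            have hmodd : m % 2 = 1 := by omega
            set w : Int := (m : ℤ) with hwdef
            have hw : Odd w := by rw [Int.odd_iff]; omega
            have hw0 : 0 < w := by omega
            have hseq : x + y = 2^u * w := by
              have h5 : ((x+y).toNat : ℤ) = x + y := by omega
              rw [← h5, hmeq]; push_cast; ring
            have hodd2 : w % 2 = 1 := Int.odd_iff.mp hw
            have h4' : (4:ℤ) ∣ x + y := by omega
            have hu2 : 2 ≤ u := by
              by_contra hlt
              obtain ⟨t, ht⟩ := h4'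
              rw [hseq] at ht
              interval_cases u
              · simp at ht; omega
              · norm_num at ht; omega
            have hna : ((x+y).natAbs : ℤ) = x + y := by omega
            have habs : |x + y| = x + y := abs_of_nonneg (by omega)
            have hwp : (0:ℤ) < 2^u := pow_pos (by norm_num) u
            by_cases hwx : w ∣ x
            · obtain ⟨c, hc⟩ := hwx
              have hc0 : 0 < c := by nlinarith
              obtain ⟨a, d, hd, hd0, hcd⟩ := exists_two_pow_mul_odd c hc0
              have hxrep : x = 2^a * d * w := by rw [hc, hcd]; ring
              have hap : (0:ℤ) < 2^a := pow_pos (by norm_num) a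
              have hau : a < u := by
                have h5 : (2:ℤ)^a * w ≤ x := by rw [hxrep]; nlinarith
                have h6 : x < 2^u * w := by nlinarith [hseq]
                have h7 : (2:ℤ)^a < 2^u := lt_of_mul_lt_mul_right (lt_of_le_of_lt h5 h6) hw0.le
                by_contra hge
                have h8 : (2:ℤ)^u ≤ 2^a := pow_le_pow_right₀ (by norm_num) (by omega)
                omega
              have hfuel : u - 1 - a < (x+y).natAbs := by
                have h8 : (2:ℤ)^u ≤ x + y := by rw [hseq]; nlinarith
                have h9 : (2:ℕ)^u ≤ (x+y).natAbs := by
                  have h10 : ((2^u : ℕ) : ℤ) ≤ ((x+y).natAbs : ℤ) := by push_cast; linarith [h8, habs]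
                  exact_mod_cast h10
                have h11 := Nat.lt_two_pow_self (n := u)
                omega
              rw [checkLoop_pow u w hw hw0 (x+y).natAbs a x y [x] hseq hx hy
                  ⟨d, hd, hd0, hxrep⟩ hau
                  (by intro z hz; rw [List.mem_singleton.mp hz]
                      exact ⟨a, le_rfl, d, hd, hxrep⟩) hfuel]
              simp only [Option.getD_some]
              exact (check_alt_pos_zero x y hx hy hxy
                ((bridge x y u w hw hw0 hx hy hseq).mpr ⟨c, hc⟩)).symm
            · rw [checkLoop_npow u w hw hw0 (x+y).natAbs x y [x] hseq hx hy hwx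
                  (List.nodup_singleton x)
                  (by intro z hz; rw [List.mem_singleton.mp hz]
                      refine ⟨hx, ?_⟩; nlinarith [hseq])
                  (by rw [← hseq]; simp only [List.length_singleton]; push_cast; linarith [habs])]
              simp only [Option.getD_some]
              exact (check_alt_pos_one x y hx hy hxy
                (fun hex => hwx ((bridge x y u w hw hw0 hx hy hseq).mp hex))).symm

-- ===== VERDICT (by name: the statement is the Claim_ definition above) =====
theorem check_spec : Claim_equal_check := by
  intro x y _ hpre
  exact check_eq_alt x y hpre
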